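-- pv_equiv track=rewrite | github.com/gyang274/leetcode | src/1526.min.num.increment.subarray.py | minNumberOperations
-- ===== SOURCE A (Python) =====
-- from typing import List
--
-- def minNumberOperations(target: List[int]) -> int:
--   # TC: O(N), SC: O(1), stack
--   #  keep a stack of increasing nums, settle whenever see a decrease
--   stack, count = [], 0
--   for x in target:
--     m = 0
--     while stack and stack[-1] >= x:
--       m = max(m, stack.pop() - x)
--     count += m
--     stack.append(x)
--   count += stack[-1]
--   return count
-- ===== SOURCE B (Python) =====
-- from typing import List
--
-- def minNumberOperations(target: List[int]) -> int:
--   # prefix-difference closed form: base target[0] plus each positive increase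
--   total = target[0]
--   prev = target[0]
--   for cur in target[1:]:
--     if cur > prev:
--       total += cur - prev
--     prev = cur
--   return total
-- ===== Notes on version B (the rewrite author's own statement) =====
-- stated objective: simpler
-- what changed: Replaced the monotonic stack (pop/max bookkeeping per element) with the prefix-difference closed form: the first element plus the sum of positive consecutive increases, one running total and no stack.
import Mathlib
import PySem

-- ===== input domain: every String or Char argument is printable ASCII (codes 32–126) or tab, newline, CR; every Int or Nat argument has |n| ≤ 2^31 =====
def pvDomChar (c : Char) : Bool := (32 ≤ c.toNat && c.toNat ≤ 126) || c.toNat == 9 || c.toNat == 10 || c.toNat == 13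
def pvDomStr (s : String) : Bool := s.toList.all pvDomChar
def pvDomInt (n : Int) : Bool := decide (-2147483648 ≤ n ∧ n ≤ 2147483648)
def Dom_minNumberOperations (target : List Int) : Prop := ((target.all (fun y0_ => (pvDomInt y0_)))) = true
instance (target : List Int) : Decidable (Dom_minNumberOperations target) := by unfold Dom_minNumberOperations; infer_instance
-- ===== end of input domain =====

-- B replaces A's monotonic stack by the closed form target[0] + Σ max(0, target[i]-target[i-1]) with a single running total (simpler, O(1) extra space).
-- Both A and B raise IndexError on the empty list; Pre_ excludes it.

-- ===== PORT A =====
-- the inner `while stack and stack[-1] >= x` pop loop; stack head = Python stack[-1] (top)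
def popGE (stack : List Int) (x m : Int) : List Int × Int :=
  match stack with
  | [] => ([], m)
  | s :: rest => if s ≥ x then popGE rest x (max m (s - x)) else (s :: rest, m)

def stepA (st : List Int × Int) (x : Int) : List Int × Int :=
  let (s, m) := popGE st.1 x 0
  (x :: s, st.2 + m)

def minNumberOperations (target : List Int) : Int :=
  let st := target.foldl stepA ([], 0)
  -- `count += stack[-1]`: Python raises IndexError on an empty stack (target = []), excluded by Pre_
  st.2 + st.1.headD 0

-- ===== PORT B =====
def minNumberOperations_alt (target : List Int) : Int :=
  match target with
  | [] => 0  -- Python: target[0] raises IndexError here; outside Pre_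
  | t0 :: rest =>
    (rest.foldl (fun (st : Int × Int) cur =>
        (if cur > st.2 then st.1 + (cur - st.2) else st.1, cur)) (t0, t0)).1

-- ===== PRECONDITION & SPEC =====
-- Pre_: A raises IndexError on the empty list (stack[-1] after the loop); nothing else is excluded.
def Pre_minNumberOperations (target : List Int) : Prop := target ≠ []
instance (target : List Int) : Decidable (Pre_minNumberOperations target) := by unfold Pre_minNumberOperations; infer_instance
def pvWitness_minNumberOperations : List Int := [1, 2, 1]

def Spec_minNumberOperations (target : List Int) (out : Int) : Prop := out = minNumberOperations_alt target
instance (target : List Int) (out : Int) : Decidable (Spec_minNumberOperations target out) := by unfold Spec_minNumberOperations; infer_instance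

-- ===== CLAIM (what is proved, stated in full; the proofs are below) =====
def Claim_equal_minNumberOperations : Prop := ∀ (target : List Int), Dom_minNumberOperations target → Pre_minNumberOperations target → Spec_minNumberOperations target (minNumberOperations target)

-- ===== LEMMAS AND PROOFS =====

-- popGE on a strictly decreasing stack whose top h satisfies h ≥ x:
-- it drops the ≥-x prefix and the accumulated max is max m (h - x) (h is the largest popped).
lemma popGE_lt (x h m : Int) (s : List Int) (hlt : h < x) :
    popGE (h :: s) x m = (h :: s, m) := by
  have : ¬ (h ≥ x) := by omega
  simp [popGE, this]

lemma popGE_ge (x : Int) : ∀ (s : List Int) (h m : Int), List.IsChain (· > ·) (h :: s) → h ≥ x →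
    popGE (h :: s) x m = ((h :: s).dropWhile (fun a => decide (a ≥ x)), max m (h - x)) := by
  intro s
  induction s with
  | nil =>
    intro h m _ hge
    simp [popGE, hge, List.dropWhile]
  | cons h2 t ih =>
    intro h m hch hge
    have hgt : h > h2 := (List.isChain_cons_cons.mp hch).1
    have hch2 : List.IsChain (· > ·) (h2 :: t) := (List.isChain_cons_cons.mp hch).2
    have hstep : popGE (h :: h2 :: t) x m = popGE (h2 :: t) x (max m (h - x)) := by
      simp [popGE, hge]
    by_cases h2ge : h2 ≥ x
    · have hrec := ih h2 (max m (h - x)) hch2 h2ge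
      have hmax : max (max m (h - x)) (h2 - x) = max m (h - x) := by omega
      rw [hstep, hrec, hmax]
      simp [List.dropWhile, hge, h2ge]
    · rw [hstep, popGE_lt x h2 _ t (by omega)]
      simp [List.dropWhile, hge, h2ge]

-- dropWhile keeps the chain and its head fails the predicate
lemma chain'_dropWhile {p : Int → Bool} {s : List Int} (h : List.IsChain (· > ·) s) :
    List.IsChain (· > ·) (s.dropWhile p) :=
  h.sublist (List.dropWhile_sublist p)

-- main invariant: with stack = prev :: s strictly decreasing and count + prev = total,
-- finishing A's loop from this state and adding the final top equals finishing B's loop from (total, prev).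
lemma loop_inv : ∀ (rest : List Int) (prev : Int) (s : List Int) (c total : Int),
    List.IsChain (· > ·) (prev :: s) → c + prev = total →
    (rest.foldl stepA (prev :: s, c)).2 + (rest.foldl stepA (prev :: s, c)).1.headD 0
      = (rest.foldl (fun (st : Int × Int) cur =>
          (if cur > st.2 then st.1 + (cur - st.2) else st.1, cur)) (total, prev)).1 := by
  intro rest
  induction rest with
  | nil =>
    intro prev s c total _ hsum
    simpa using hsum
  | cons x xs ih =>
    intro prev s c total hch hsum
    by_cases hge : prev ≥ x
    · -- pop at least prev; m = prev - x; B does not add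
      have hpop := popGE_ge x s prev 0 hch hge
      have hmax : max (0 : Int) (prev - x) = prev - x := by omega
      rw [hmax] at hpop
      have hstep : stepA (prev :: s, c) x
          = (x :: (prev :: s).dropWhile (fun a => decide (a ≥ x)), c + (prev - x)) := by
        simp [stepA, hpop]
      have hch' : List.IsChain (· > ·)
          (x :: (prev :: s).dropWhile (fun a => decide (a ≥ x))) := by
        rcases hdw : (prev :: s).dropWhile (fun a => decide (a ≥ x)) with _ | ⟨h1, t1⟩
        · exact List.isChain_singleton _
        · have hhead : ¬ ((fun a => decide (a ≥ x)) h1 = true) := by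
            have := List.head?_dropWhile_not (fun a => decide (a ≥ x)) (prev :: s)
            rw [hdw] at this
            simpa using this
          have h1lt : h1 < x := by simpa using hhead
          have := chain'_dropWhile (p := fun a => decide (a ≥ x)) hch
          rw [hdw] at this
          exact List.isChain_cons_cons.mpr ⟨h1lt, this⟩
      have hB : ¬ (x > prev) := by omega
      simp only [List.foldl_cons, hstep, hB]
      exact ih x _ (c + (prev - x)) total hch' (by omega)
    · -- prev < x: nothing popped, B adds x - prev
      have hlt : prev < x := by omega
      have hstep : stepA (prev :: s, c) x = (x :: prev :: s, c + 0) := by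
        simp [stepA, popGE_lt x prev 0 s hlt]
      have hch' : List.IsChain (· > ·) (x :: prev :: s) :=
        List.isChain_cons_cons.mpr ⟨hlt, hch⟩
      have hB : x > prev := hlt
      simp only [List.foldl_cons, hstep, if_pos hB]
      exact ih x _ (c + 0) (total + (x - prev)) hch' (by omega)

-- ===== VERDICT (by name: the statement is the Claim_ definition above) =====
theorem minNumberOperations_spec : Claim_equal_minNumberOperations := by
  intro target _ hpre
  unfold Spec_minNumberOperations
  match target with
  | [] => exact absurd rfl hpre
  | t0 :: rest =>
    have hstep0 : stepA ([], 0) t0 = ([t0], 0) := by simp [stepA, popGE]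
    show (List.foldl stepA ([], 0) (t0 :: rest)).2
        + (List.foldl stepA ([], 0) (t0 :: rest)).1.headD 0 = _
    rw [List.foldl_cons, hstep0]
    have := loop_inv rest t0 [] 0 t0 (List.isChain_singleton _) (by ring)
    simpa [minNumberOperations_alt] using this
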